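-- pv_equiv track=rewrite | github.com/kamkar11/start-python | poker/poker3.py | is_rank_sequence
-- ===== SOURCE A (Python) =====
-- def is_rank_sequence(hand):
--     hand_rank_list = []
--     for card in hand:
--         hand_rank_list.append(card[0])
--     if set(['10', 'J', 'D', 'K', 'A']).issubset(set(hand_rank_list)):
--         return True
--     elif set(['9', '10', 'J', 'D', 'K']).issubset(set(hand_rank_list)):
--         return True
--     elif set(['8', '9', '10', 'J', 'D']).issubset(set(hand_rank_list)):
--         return True
--     elif set(['7', '8', '9', '10', 'J']).issubset(set(hand_rank_list)):
--         return True
--     elif set(['6', '7', '8', '9', '10']).issubset(set(hand_rank_list)):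
--         return True
--     elif set(['5', '6', '7', '8', '9']).issubset(set(hand_rank_list)):
--         return True
--     elif set(['4', '5', '6', '7', '8']).issubset(set(hand_rank_list)):
--         return True
--     elif set(['3', '4', '5', '6', '7']).issubset(set(hand_rank_list)):
--         return True
--     elif set(['2', '3', '4', '5', '6']).issubset(set(hand_rank_list)):
--         return True
--     else:
--         return False
-- ===== SOURCE B (Python) =====
-- def is_rank_sequence(hand):
--     order = ['2', '3', '4', '5', '6', '7', '8', '9', '10', 'J', 'D', 'K', 'A']
--     ranks = {card[0] for card in hand}
--     run = 0
--     for r in order: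
--         run = run + 1 if r in ranks else 0
--         if run >= 5:
--             return True
--     return False
-- ===== Notes on version B (the rewrite author's own statement) =====
-- stated objective: simpler
-- what changed: Replaces the nine hard-coded five-rank subset tests with a single run-length scan: walk the 13 ranks in order once, counting consecutive ranks present in the hand, and return True as soon as the run reaches 5.
import Mathlib
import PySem

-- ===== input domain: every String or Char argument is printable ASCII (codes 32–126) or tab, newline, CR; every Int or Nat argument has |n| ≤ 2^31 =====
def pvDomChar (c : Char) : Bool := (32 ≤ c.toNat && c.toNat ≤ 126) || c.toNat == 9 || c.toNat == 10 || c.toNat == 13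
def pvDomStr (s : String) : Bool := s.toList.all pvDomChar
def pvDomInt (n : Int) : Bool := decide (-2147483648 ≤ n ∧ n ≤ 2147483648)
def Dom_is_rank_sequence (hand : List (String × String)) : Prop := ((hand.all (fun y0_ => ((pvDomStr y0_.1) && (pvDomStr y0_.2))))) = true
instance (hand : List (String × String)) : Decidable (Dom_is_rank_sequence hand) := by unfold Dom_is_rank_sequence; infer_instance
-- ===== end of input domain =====

-- B replaces A's nine hard-coded five-rank subset tests by a single run-length scan
-- over the 13 ranks in order, returning true when the run of present ranks reaches 5 (objective: simpler).

-- ===== PORT A =====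
-- Literal port of A: build hand_rank_list by appending card[0], then the nine
-- hard-coded set-literal issubset checks, high straight first.
def is_rank_sequence (hand : List (String × String)) : Bool :=
  let hand_rank_list := hand.foldl (fun acc card => acc ++ [card.1]) []
  let s := PySem.Set.ofList hand_rank_list
  if PySem.Set.issubset (PySem.Set.ofList ["10", "J", "D", "K", "A"]) s then true
  else if PySem.Set.issubset (PySem.Set.ofList ["9", "10", "J", "D", "K"]) s then true
  else if PySem.Set.issubset (PySem.Set.ofList ["8", "9", "10", "J", "D"]) s then true
  else if PySem.Set.issubset (PySem.Set.ofList ["7", "8", "9", "10", "J"]) s then true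
  else if PySem.Set.issubset (PySem.Set.ofList ["6", "7", "8", "9", "10"]) s then true
  else if PySem.Set.issubset (PySem.Set.ofList ["5", "6", "7", "8", "9"]) s then true
  else if PySem.Set.issubset (PySem.Set.ofList ["4", "5", "6", "7", "8"]) s then true
  else if PySem.Set.issubset (PySem.Set.ofList ["3", "4", "5", "6", "7"]) s then true
  else if PySem.Set.issubset (PySem.Set.ofList ["2", "3", "4", "5", "6"]) s then true
  else false

-- ===== PORT B =====
-- Port of B: one pass over the ordered rank list, keeping the length of the
-- current run of ranks present in the hand; true as soon as the run reaches 5.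
def pvOrder : List String := ["2", "3", "4", "5", "6", "7", "8", "9", "10", "J", "D", "K", "A"]

def pvRunScan (ranks : PySem.Set String) : List String → Nat → Bool
  | [], _ => false
  | r :: rest, run =>
    let run' := if PySem.Set.contains ranks r then run + 1 else 0
    if 5 ≤ run' then true else pvRunScan ranks rest run'

def is_rank_sequence_alt (hand : List (String × String)) : Bool :=
  let ranks := PySem.Set.ofList (hand.map (fun card => card.1))
  pvRunScan ranks pvOrder 0

-- ===== PRECONDITION & SPEC =====
def Spec_is_rank_sequence (hand : List (String × String)) (out : Bool) : Prop := out = is_rank_sequence_alt hand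
instance (hand : List (String × String)) (out : Bool) : Decidable (Spec_is_rank_sequence hand out) := by unfold Spec_is_rank_sequence; infer_instance

-- ===== CLAIM (what is proved, stated in full; the proofs are below) =====
def Claim_equal_is_rank_sequence : Prop := ∀ (hand : List (String × String)), Dom_is_rank_sequence hand → Spec_is_rank_sequence hand (is_rank_sequence hand)

-- ===== LEMMAS AND PROOFS =====

-- hand_rank_list is just the list of first components.
theorem pv_ranks_eq (hand : List (String × String)) :
    hand.foldl (fun acc card => acc ++ [card.1]) [] = hand.map (fun card => card.1) := by
  have h : ∀ (l : List (String × String)) (acc : List String),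
      l.foldl (fun acc card => acc ++ [card.1]) acc = acc ++ l.map (fun card => card.1) := by
    intro l
    induction l with
    | nil => intro acc; simp
    | cons x xs ih => intro acc; simp [List.foldl, ih]
  simpa using h hand []

-- an issubset of a literal set is the conjunction of the memberships
theorem pv_issubset_all (w : List String) (s : PySem.Set String) :
    PySem.Set.issubset (PySem.Set.ofList w) s = w.all (fun r => PySem.Set.contains s r) := by
  rcases h : w.all (fun r => PySem.Set.contains s r) with _ | _
  · rw [Bool.eq_false_iff]
    intro hsub
    rw [List.all_eq_false] at h
    rcases h with ⟨r, hr, hc⟩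
    rw [PySem.Set.issubset_iff] at hsub
    have := hsub r (by simp [PySem.Set.mem_ofList, hr])
    simp [PySem.Set.contains] at hc
    exact absurd this (by simpa using hc)
  · rw [PySem.Set.issubset_iff]
    intro x hx
    rw [PySem.Set.mem_ofList] at hx
    have := List.all_eq_true.mp h x hx
    simpa [PySem.Set.contains] using this

-- B's scan over strings equals the same scan over the membership booleans
def pvRunScanB : List Bool → Nat → Bool
  | [], _ => false
  | b :: rest, run =>
    let run' := if b then run + 1 else 0
    if 5 ≤ run' then true else pvRunScanB rest run'

def pvLeadT : List Bool → Nat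
  | [] => 0
  | b :: t => if b then pvLeadT t + 1 else 0

def pvHasWin : List Bool → Bool
  | [] => false
  | b :: t => (decide (5 ≤ pvLeadT (b :: t))) || pvHasWin t

theorem pv_absorb (t : List Bool) :
    ((decide (5 ≤ pvLeadT t)) || pvHasWin t) = pvHasWin t := by
  cases t with
  | nil => simp [pvLeadT, pvHasWin]
  | cons b u => simp [pvHasWin]

theorem pv_scan (l : List Bool) : ∀ run : Nat, run ≤ 4 →
    pvRunScanB l run = ((decide (5 - run ≤ pvLeadT l)) || pvHasWin l) := by
  induction l with
  | nil =>
    intro run h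
    simp [pvRunScanB, pvLeadT, pvHasWin]
    omega
  | cons b t ih =>
    intro run h
    cases b with
    | false =>
      have h1 : decide (5 - run ≤ pvLeadT (false :: t)) = false := by
        simp [pvLeadT]; omega
      have h2 : decide (5 ≤ pvLeadT (false :: t)) = false := by simp [pvLeadT]
      have hstep : pvRunScanB (false :: t) run = pvRunScanB t 0 := by simp [pvRunScanB]
      rw [hstep, ih 0 (by omega), h1]
      simp only [Bool.false_or, pvHasWin]
      rw [h2]
      simp only [Bool.false_or, Nat.sub_zero]
      exact pv_absorb t
    | true =>
      by_cases h5 : run = 4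
      · subst h5
        have : pvRunScanB (true :: t) 4 = true := by simp [pvRunScanB]
        rw [this]
        have : decide (5 - 4 ≤ pvLeadT (true :: t)) = true := by
          simp [pvLeadT]
        rw [this]; simp
      · have hrun : run ≤ 3 := by omega
        have hstep : pvRunScanB (true :: t) run = pvRunScanB t (run + 1) := by
          simp [pvRunScanB]; omega
        have hl : pvLeadT (true :: t) = pvLeadT t + 1 := by simp [pvLeadT]
        rw [hstep, ih (run + 1) (by omega)]
        simp only [pvHasWin]
        rw [hl]
        by_cases h1 : 4 - run ≤ pvLeadT t
        · have e1 : decide (5 - (run + 1) ≤ pvLeadT t) = true := by simp; omega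
          have e2 : decide (5 - run ≤ pvLeadT t + 1) = true := by simp; omega
          rw [e1, e2]; simp
        · have e1 : decide (5 - (run + 1) ≤ pvLeadT t) = false := by simp; omega
          have e2 : decide (5 - run ≤ pvLeadT t + 1) = false := by simp; omega
          have e3 : decide (5 ≤ pvLeadT t + 1) = false := by simp; omega
          rw [e1, e2, e3]; simp

theorem pv_leadT5 (a b c d e : Bool) (rest : List Bool) :
    decide (5 ≤ pvLeadT (a :: b :: c :: d :: e :: rest)) = (a && (b && (c && (d && e)))) := by
  cases a <;> cases b <;> cases c <;> cases d <;> cases e <;>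
    simp [pvLeadT, Nat.le_add_left]

theorem pv_leadT_short (l : List Bool) (h : l.length < 5) :
    decide (5 ≤ pvLeadT l) = false := by
  have hle : ∀ m : List Bool, pvLeadT m ≤ m.length := by
    intro m; induction m with
    | nil => simp [pvLeadT]
    | cons b t ih => cases b <;> simp [pvLeadT] <;> omega
  have := hle l
  simp; omega

theorem pv_leadT_short4 (a b c d : Bool) : decide (5 ≤ pvLeadT [a, b, c, d]) = false :=
  pv_leadT_short _ (by simp)
theorem pv_leadT_short3 (a b c : Bool) : decide (5 ≤ pvLeadT [a, b, c]) = false :=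
  pv_leadT_short _ (by simp)
theorem pv_leadT_short2 (a b : Bool) : decide (5 ≤ pvLeadT [a, b]) = false :=
  pv_leadT_short _ (by simp)
theorem pv_leadT_short1 (a : Bool) : decide (5 ≤ pvLeadT [a]) = false :=
  pv_leadT_short _ (by simp)

-- the nine window tests equal the run-length scan over the 13 membership booleans
theorem pv_final (b2 b3 b4 b5 b6 b7 b8 b9 bT bJ bD bK bA : Bool) :
    (if (bT && (bJ && (bD && (bK && bA)))) then true
     else if (b9 && (bT && (bJ && (bD && bK)))) then true
     else if (b8 && (b9 && (bT && (bJ && bD)))) then true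
     else if (b7 && (b8 && (b9 && (bT && bJ)))) then true
     else if (b6 && (b7 && (b8 && (b9 && bT)))) then true
     else if (b5 && (b6 && (b7 && (b8 && b9)))) then true
     else if (b4 && (b5 && (b6 && (b7 && b8)))) then true
     else if (b3 && (b4 && (b5 && (b6 && b7)))) then true
     else if (b2 && (b3 && (b4 && (b5 && b6)))) then true
     else false)
    = pvRunScanB [b2, b3, b4, b5, b6, b7, b8, b9, bT, bJ, bD, bK, bA] 0 := by
  rw [pv_scan _ 0 (by omega)]
  simp only [Nat.sub_zero, pvHasWin, pv_leadT5, pv_leadT_short4, pv_leadT_short3, pv_leadT_short2, pv_leadT_short1]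
  simp only [Bool.if_true_left, Bool.or_false, Bool.false_or]
  simp [Bool.or_comm, Bool.or_left_comm, Bool.or_assoc]

theorem pv_runScan_map (s : PySem.Set String) (l : List String) (run : Nat) :
    pvRunScan s l run = pvRunScanB (l.map (fun r => PySem.Set.contains s r)) run := by
  induction l generalizing run with
  | nil => rfl
  | cons r rest ih => simp [pvRunScan, pvRunScanB, ih]

-- ===== VERDICT (by name: the statement is the Claim_ definition above) =====
theorem is_rank_sequence_spec : Claim_equal_is_rank_sequence := by
  intro hand _
  unfold Spec_is_rank_sequence is_rank_sequence is_rank_sequence_alt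
  rw [pv_ranks_eq, pv_runScan_map]
  simp only [pv_issubset_all, pvOrder, List.map_cons, List.map_nil, List.all_cons, List.all_nil,
    Bool.and_true]
  exact pv_final _ _ _ _ _ _ _ _ _ _ _ _ _
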